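-- pv_equiv track=rewrite | github.com/twardoch/noto-emoji | generate_emoji_placeholders.py | get_combining_text
-- ===== SOURCE A (Python) =====
-- char_map = {
--     0x1F468: "M",
--     0x1F469: "W",
--     0x1F466: "B",
--     0x1F467: "G",
--     0x2764: "H",  # heavy black heart, no var sel
--     0x1F48B: "K",  # kiss mark
--     0x200D: "-",  # zwj placeholder
--     0xFE0F: "-",  # variation selector placeholder
--     0x1F441: "I",  # Eye
--     0x1F5E8: "W",  # 'witness' (left speech bubble)
-- }
--
-- def get_combining_text(values):
--     chars = []
--     for v in values:
--         char = char_map.get(v, None)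
--         if not char:
--             return None
--         if char != "-":
--             chars.append(char)
--     return "".join(chars)
-- ===== SOURCE B (Python) =====
-- char_map = {
--     0x1F468: "M",
--     0x1F469: "W",
--     0x1F466: "B",
--     0x1F467: "G",
--     0x2764: "H",
--     0x1F48B: "K",
--     0x200D: "-",
--     0xFE0F: "-",
--     0x1F441: "I",
--     0x1F5E8: "W",
-- }
--
-- def get_combining_text(values):
--     # pass 1: validate that every code point is known
--     if any(v not in char_map for v in values):
--         return None
--     # pass 2: emit letters, dropping placeholders
--     return "".join(char_map[v] for v in values if char_map[v] != "-")
-- ===== Notes on version B (the rewrite author's own statement) =====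
-- stated objective: simpler
-- what changed: Replaces A's single fused loop (lookup + early return + append + join) with two separate passes: an any() validity check over the whole list, then a join over a comprehension that drops placeholders.
import Mathlib
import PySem

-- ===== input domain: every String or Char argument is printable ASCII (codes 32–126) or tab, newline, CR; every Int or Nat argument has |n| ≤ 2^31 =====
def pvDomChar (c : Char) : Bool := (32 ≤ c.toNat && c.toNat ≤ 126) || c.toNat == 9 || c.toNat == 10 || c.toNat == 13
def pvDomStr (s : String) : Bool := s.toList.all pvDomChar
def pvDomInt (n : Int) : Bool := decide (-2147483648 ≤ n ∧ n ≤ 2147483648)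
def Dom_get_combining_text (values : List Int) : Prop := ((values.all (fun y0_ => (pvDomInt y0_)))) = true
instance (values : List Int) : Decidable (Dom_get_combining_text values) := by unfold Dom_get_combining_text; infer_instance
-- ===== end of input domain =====

-- B restructures A's single fused loop into two passes (validate with any(), then build by comprehension); same output, objective: simpler.

-- ===== PORT A =====
-- the module-level dict literal `char_map` has pairwise-distinct keys, so its `.get`
-- is ported exactly as this lookup function (first = only match)
def charMap (v : Int) : Option String :=
  if v = 0x1F468 then some "M"
  else if v = 0x1F469 then some "W"
  else if v = 0x1F466 then some "B"
  else if v = 0x1F467 then some "G"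
  else if v = 0x2764 then some "H"
  else if v = 0x1F48B then some "K"
  else if v = 0x200D then some "-"
  else if v = 0xFE0F then some "-"
  else if v = 0x1F441 then some "I"
  else if v = 0x1F5E8 then some "W"
  else none

-- the loop body: `char = char_map.get(v); if not char: return None; if char != "-": chars.append(char)`
-- (`not char` is true for None and for the empty string — both kept, as in Python)
def goA (values : List Int) (chars : List String) : Option String :=
  match values with
  | [] => some (PySem.Str.join "" chars)
  | v :: rest =>
    match charMap v with
    | none => none
    | some c => if c = "" then none else if c ≠ "-" then goA rest (chars ++ [c]) else goA rest chars

def get_combining_text (values : List Int) : Option String := goA values []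

-- ===== PORT B =====
def get_combining_text_alt (values : List Int) : Option String :=
  if values.any (fun v => (charMap v).isNone) then none
  else some (PySem.Str.join "" (values.filterMap (fun v =>
    let c := (charMap v).getD ""
    if c ≠ "-" then some c else none)))

-- ===== PRECONDITION & SPEC =====
def Spec_get_combining_text (values : List Int) (out : Option String) : Prop := out = get_combining_text_alt values
instance (values : List Int) (out : Option String) : Decidable (Spec_get_combining_text values out) := by unfold Spec_get_combining_text; infer_instance

-- ===== CLAIM (what is proved, stated in full; the proofs are below) =====
def Claim_equal_get_combining_text : Prop := ∀ (values : List Int), Dom_get_combining_text values → Spec_get_combining_text values (get_combining_text values)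

-- ===== LEMMAS AND PROOFS =====

-- every value of char_map is a nonempty string, so the `not char` branch only fires on a missing key
lemma charMap_ne_empty (v : Int) (c : String) (h : charMap v = some c) : c ≠ "" := by
  unfold charMap at h
  split_ifs at h <;> (injection h with h; subst h; decide)

lemma goA_eq (values : List Int) (chars : List String) :
    goA values chars =
      if values.any (fun v => (charMap v).isNone) then none
      else some (PySem.Str.join "" (chars ++ values.filterMap (fun v =>
        let c := (charMap v).getD ""
        if c ≠ "-" then some c else none))) := by
  induction values generalizing chars with
  | nil => simp [goA]
  | cons v rest ih =>
    cases hv : charMap v with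
    | none => simp [goA, hv]
    | some c =>
      have hne := charMap_ne_empty v c hv
      by_cases hdash : c = "-"
      · simp [goA, hv, hdash, ih]
      · simp only [goA, hv, if_neg hne, if_pos hdash]
        rw [ih]
        simp [hv, hdash]

theorem get_combining_text_spec' (values : List Int) :
    get_combining_text values = get_combining_text_alt values := by
  unfold get_combining_text get_combining_text_alt
  rw [goA_eq]
  simp

-- ===== VERDICT (by name: the statement is the Claim_ definition above) =====
theorem get_combining_text_spec : Claim_equal_get_combining_text := by
  intro values _
  unfold Spec_get_combining_text
  exact get_combining_text_spec' values
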